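-- pv_equiv track=rewrite | github.com/alikhalilli/Algorithms | .z/Arrays/Arrangement/RearrangeV2.py | rearrangeArr
-- ===== SOURCE A (Python) =====
-- def rearrangeArr(arr):
--     n = len(arr)
--     s = set()
--     for i in range(n):
--         s.add(arr[i])
--     for i in range(n):
--         if i in s:
--             arr[i] = i
--         else:
--             arr[i] = -1
--     return arr
-- ===== SOURCE B (Python) =====
-- def rearrangeArr(arr):
--     # Scatter pass: write each in-range value v directly to slot v of a
--     # fresh all -1 result; no set, no membership queries.
--     n = len(arr)
--     res = [-1] * n
--     for v in arr:
--         if 0 <= v < n: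
--             res[v] = v
--     arr[:] = res
--     return arr
-- ===== Notes on version B (the rewrite author's own statement) =====
-- stated objective: faster
-- what changed: B replaces A's build-a-set-then-query-each-index scheme by a single scatter pass that writes each in-range value v directly into slot v of an all -1 result list, so the auxiliary hash set and the per-index membership loop disappear.
import Mathlib
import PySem

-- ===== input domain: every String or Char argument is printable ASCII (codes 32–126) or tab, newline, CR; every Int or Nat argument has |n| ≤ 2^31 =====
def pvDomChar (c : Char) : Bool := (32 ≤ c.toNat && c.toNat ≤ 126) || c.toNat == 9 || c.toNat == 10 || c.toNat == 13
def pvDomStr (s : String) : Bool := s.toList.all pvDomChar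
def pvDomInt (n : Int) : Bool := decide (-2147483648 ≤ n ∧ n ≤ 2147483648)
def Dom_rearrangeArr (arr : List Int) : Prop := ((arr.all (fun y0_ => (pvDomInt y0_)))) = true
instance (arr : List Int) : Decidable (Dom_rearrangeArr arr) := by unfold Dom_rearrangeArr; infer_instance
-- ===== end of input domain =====

-- B replaces A's build-a-set-then-query scheme by one scatter pass into an all -1 result
-- (objective: simpler); both Pythons overwrite the caller's list in place, the equivalence
-- proved is about the return value.

-- ===== PORT A =====
def rearrangeArr (arr : List Int) : List Int :=
  let n : Int := arr.length
  let s : PySem.Set Int :=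
    (PySem.List.pyRange 0 n 1).foldl
      (fun s i => PySem.Set.add s (PySem.List.pyGetD arr i 0)) PySem.Set.empty
  (PySem.List.pyRange 0 n 1).foldl
    (fun a i =>
      if PySem.Set.contains s i then PySem.List.pySetD a i i
      else PySem.List.pySetD a i (-1)) arr

-- ===== PORT B =====
def rearrangeArr_alt (arr : List Int) : List Int :=
  let n : Int := arr.length
  let res : List Int := List.replicate arr.length (-1)
  arr.foldl (fun res v => if 0 ≤ v ∧ v < n then PySem.List.pySetD res v v else res) res

-- ===== PRECONDITION & SPEC =====
def Spec_rearrangeArr (arr : List Int) (out : List Int) : Prop := out = rearrangeArr_alt arr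
instance (arr : List Int) (out : List Int) : Decidable (Spec_rearrangeArr arr out) := by unfold Spec_rearrangeArr; infer_instance

-- ===== CLAIM (what is proved, stated in full; the proofs are below) =====
def Claim_equal_rearrangeArr : Prop := ∀ (arr : List Int), Dom_rearrangeArr arr → Spec_rearrangeArr arr (rearrangeArr arr)

-- ===== LEMMAS AND PROOFS =====

-- A's write loop: writing f i at every index i of a list of length >= n fills a map-of-range prefix.
theorem foldl_pySetD_range (f : Int → Int) :
    ∀ (n : Nat) (l : List Int), n ≤ l.length →
      (PySem.List.pyRange 0 (n : Int) 1).foldl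
        (fun a i => PySem.List.pySetD a i (f i)) l
      = (List.range n).map (fun k : Nat => f (k : Int)) ++ l.drop n := by
  intro n
  induction n with
  | zero => intro l _; simp
  | succ n ih =>
    intro l hl
    have h1 : ((n : Int) + 1) = ((n + 1 : Nat) : Int) := by push_cast; ring
    have h2 := PySem.List.pyRange_one_succ_right (a := 0) (b := (n : Int)) (by positivity)
    rw [← h1, h2, List.foldl_append, ih l (by omega)]
    have hdrop : l.drop n = l[n] :: l.drop (n + 1) := List.drop_eq_getElem_cons (by omega)
    simp only [List.foldl_cons, List.foldl_nil]
    rw [PySem.List.pySetD_natCast, hdrop]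
    rw [List.set_append_right _ _ (by simp)]
    simp only [List.range_succ]
    simp
    rw [hdrop, List.set_cons_zero]

-- B's scatter loop: after scattering xs into res, slot k holds k exactly when k occurs in xs.
theorem scatter_inv (n : Nat) :
    ∀ (xs res : List Int), res.length = n →
      (xs.foldl (fun r v => if 0 ≤ v ∧ v < (n : Int) then PySem.List.pySetD r v v else r) res).length = n ∧
      ∀ k, k < n →
        (xs.foldl (fun r v => if 0 ≤ v ∧ v < (n : Int) then PySem.List.pySetD r v v else r) res)[k]? =
          some (if ((k : Int) ∈ xs) then (k : Int) else res.getD k 0) := by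
  intro xs
  induction xs with
  | nil =>
    intro res h
    refine ⟨h, ?_⟩
    intro k hk
    have hk' : k < res.length := by omega
    simp [List.getElem?_eq_getElem hk']
  | cons x xs ih =>
    intro res h
    by_cases hx : 0 ≤ x ∧ x < (n : Int)
    · have hset : (PySem.List.pySetD res x x).length = n := by
        rw [PySem.List.length_pySetD]; exact h
      obtain ⟨hL, hK⟩ := ih (PySem.List.pySetD res x x) hset
      refine ⟨by simpa [hx] using hL, ?_⟩
      intro k hk
      simp only [List.foldl_cons, if_pos hx]
      rw [hK k hk]
      by_cases hmem : (k : Int) ∈ xs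
      · simp [hmem]
      · have hx' : x.toNat < res.length := by omega
        rw [PySem.List.pySetD_of_nonneg res x hx.1]
        by_cases hkx : (k : Int) = x
        · have hkn : x.toNat = k := by omega
          rw [if_neg hmem, if_pos (by simp [hkx]), hkn]
          simp [List.getD, h, hk, hkx]
        · have hkn : x.toNat ≠ k := by omega
          rw [if_neg hmem, if_neg (by simp [hkx, hmem])]
          congr 1
          simp [List.getD, hkn]
    · obtain ⟨hL, hK⟩ := ih res h
      refine ⟨by simpa [hx] using hL, ?_⟩
      intro k hk
      simp only [List.foldl_cons, if_neg hx]
      rw [hK k hk]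
      have hkx : (k : Int) ≠ x := by omega
      simp [hkx]

theorem rearrangeArr_eq_map (arr : List Int) :
    rearrangeArr arr =
      (List.range arr.length).map
        (fun k : Nat => if ((k : Int) ∈ arr) then (k : Int) else -1) := by
  unfold rearrangeArr
  simp only
  have hs : (PySem.List.pyRange 0 (arr.length : Int) 1).foldl
      (fun s i => PySem.Set.add s (PySem.List.pyGetD arr i 0)) PySem.Set.empty
      = PySem.Set.ofList arr := by
    rw [PySem.List.foldl_pyRange_zero_pyGetD' (f := fun s v => PySem.Set.add s v) (d := 0)]
    rfl
  rw [hs]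
  have hcongr : (PySem.List.pyRange 0 (arr.length : Int) 1).foldl
      (fun a i =>
        if PySem.Set.contains (PySem.Set.ofList arr) i then PySem.List.pySetD a i i
        else PySem.List.pySetD a i (-1)) arr
      = (PySem.List.pyRange 0 (arr.length : Int) 1).foldl
        (fun a i => PySem.List.pySetD a i
          (if PySem.Set.contains (PySem.Set.ofList arr) i then i else -1)) arr := by
    apply PySem.List.foldl_congr_mem
    intro a i _
    exact (apply_ite (fun v => PySem.List.pySetD a i v) _ _ _).symm
  rw [hcongr, foldl_pySetD_range _ arr.length arr le_rfl]
  simp only [List.drop_length, List.append_nil]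
  apply List.map_congr_left
  intro k hk
  by_cases h : (k : Int) ∈ arr <;> simp [h]

theorem rearrangeArr_alt_eq_map (arr : List Int) :
    rearrangeArr_alt arr =
      (List.range arr.length).map
        (fun k : Nat => if ((k : Int) ∈ arr) then (k : Int) else -1) := by
  unfold rearrangeArr_alt
  simp only
  obtain ⟨hL, hK⟩ := scatter_inv arr.length arr (List.replicate arr.length (-1))
    (by simp)
  apply List.ext_getElem?
  intro k
  by_cases hk : k < arr.length
  · rw [hK k hk]
    have hrep : (List.replicate arr.length (-1 : Int)).getD k 0 = -1 := by
      rw [List.getD_eq_getElem _ 0 (by simpa using hk)]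
      simp
    rw [hrep]
    rw [List.getElem?_map, List.getElem?_range hk]
    rfl
  · rw [List.getElem?_eq_none (by omega), List.getElem?_eq_none (by simp; omega)]

-- ===== VERDICT (by name: the statement is the Claim_ definition above) =====
theorem rearrangeArr_spec : Claim_equal_rearrangeArr := by
  intro arr _
  unfold Spec_rearrangeArr
  rw [rearrangeArr_eq_map, rearrangeArr_alt_eq_map]
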